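-- pv_equiv track=rewrite | github.com/Unkno394/ts-gen | mvp_backend/matcher.py | _matches_standard_pattern
-- ===== SOURCE A (Python) =====
-- from typing import Any
--
-- IMPORTANT_DOMAIN_TOKENS = {
--     'date',
--     'created',
--     'updated',
--     'id',
--     'amount',
--     'revenue',
--     'name',
--     'description',
--     'product',
--     'quantity',
--     'organization',
--     'creator',
--     'responsible',
--     'deal',
--     'source',
--     'partner',
--     'license',
--     'gross',
--     'net',
--     'customer',
--     'unit',
-- }
--
-- def _matches_standard_pattern(prepared_target: dict[str, Any], prepared_source: dict[str, Any]) -> bool: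
--     target_tokens = prepared_target['canonical_tokens']
--     source_tokens = prepared_source['canonical_tokens']
--     if not target_tokens or not source_tokens:
--         return False
--
--     for keyword in IMPORTANT_DOMAIN_TOKENS:
--         if keyword in target_tokens and keyword not in source_tokens:
--             continue
--         if keyword in target_tokens and keyword in source_tokens:
--             remaining_target = [token for token in target_tokens if token != keyword]
--             remaining_source = [token for token in source_tokens if token != keyword]
--             if not remaining_target:
--                 return True
--             if set(remaining_target) <= set(remaining_source):
--                 return True
--     return False
-- ===== SOURCE B (Python) =====
-- IMPORTANT_DOMAIN_TOKENS = {
--     'date', 'created', 'updated', 'id', 'amount', 'revenue', 'name',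
--     'description', 'product', 'quantity', 'organization', 'creator',
--     'responsible', 'deal', 'source', 'partner', 'license', 'gross',
--     'net', 'customer', 'unit',
-- }
--
--
-- def _matches_standard_pattern(prepared_target, prepared_source):
--     target = set(prepared_target['canonical_tokens'])
--     source = set(prepared_source['canonical_tokens'])
--     if not target or not source:
--         return False
--     if not (target & IMPORTANT_DOMAIN_TOKENS & source):
--         return False
--     return target <= source
-- ===== Notes on version B (the rewrite author's own statement) =====
-- stated objective: simpler
-- what changed: Replaces the per-keyword loop that rebuilds filtered remaining lists and retests subset for every shared domain keyword with a single set-intersection emptiness test followed by one subset test, using the identity that removing a keyword present in both sides does not change the subset relation.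
import Mathlib
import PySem

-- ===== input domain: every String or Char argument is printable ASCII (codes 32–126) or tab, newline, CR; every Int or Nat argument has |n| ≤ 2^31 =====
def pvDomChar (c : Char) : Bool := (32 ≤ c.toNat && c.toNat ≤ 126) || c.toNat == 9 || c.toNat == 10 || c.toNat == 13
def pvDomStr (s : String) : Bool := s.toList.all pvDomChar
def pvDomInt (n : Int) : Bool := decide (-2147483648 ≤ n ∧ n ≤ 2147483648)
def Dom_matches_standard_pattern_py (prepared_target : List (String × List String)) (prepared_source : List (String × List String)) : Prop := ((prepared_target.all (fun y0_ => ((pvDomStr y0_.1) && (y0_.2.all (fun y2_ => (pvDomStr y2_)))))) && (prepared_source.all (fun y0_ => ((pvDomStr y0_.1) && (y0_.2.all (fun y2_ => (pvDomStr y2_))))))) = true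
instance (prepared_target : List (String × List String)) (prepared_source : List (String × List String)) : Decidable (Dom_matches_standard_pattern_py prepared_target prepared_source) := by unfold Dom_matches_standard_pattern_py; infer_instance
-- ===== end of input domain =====

-- B replaces A's per-keyword loop (filter both lists and retest subset for each shared
-- domain keyword) by one intersection-emptiness test plus one subset test: simpler, one pass.

-- ===== PORT A =====
-- the module-level set literal; iteration order of A's loop cannot affect the Bool result
def IMPORTANT_DOMAIN_TOKENS : List String :=
  ["date", "created", "updated", "id", "amount", "revenue", "name", "description",
   "product", "quantity", "organization", "creator", "responsible", "deal", "source",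
   "partner", "license", "gross", "net", "customer", "unit"]

-- the 'for keyword in IMPORTANT_DOMAIN_TOKENS' loop of A, with its early returns
def pvALoop (tt st : List String) : List String → Bool
  | [] => false
  | k :: rest =>
    if tt.contains k && !(st.contains k) then pvALoop tt st rest
    else if tt.contains k && st.contains k then
      let rt := tt.filter (fun tok => !(tok == k))
      let rs := st.filter (fun tok => !(tok == k))
      if rt.isEmpty then true
      else if PySem.Set.issubset (PySem.Set.ofList rt) (PySem.Set.ofList rs) then true
      else pvALoop tt st rest
    else pvALoop tt st rest

def matches_standard_pattern_py (prepared_target : List (String × List String)) (prepared_source : List (String × List String)) : Bool :=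
  match List.lookup "canonical_tokens" prepared_target, List.lookup "canonical_tokens" prepared_source with
  | some target_tokens, some source_tokens =>
    if target_tokens.isEmpty || source_tokens.isEmpty then false
    else pvALoop target_tokens source_tokens IMPORTANT_DOMAIN_TOKENS
  | _, _ => false   -- KeyError in Python: excluded by Pre_

-- ===== PORT B =====
def matches_standard_pattern_py_alt (prepared_target : List (String × List String)) (prepared_source : List (String × List String)) : Bool :=
  match List.lookup "canonical_tokens" prepared_target with
  | none => false   -- KeyError in Python: excluded by Pre_
  | some tt =>
    match List.lookup "canonical_tokens" prepared_source with
    | none => false   -- KeyError in Python: excluded by Pre_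
    | some st =>
      let target := PySem.Set.ofList tt
      let source := PySem.Set.ofList st
      if target.isEmpty || source.isEmpty then false
      else if (PySem.Set.inter (PySem.Set.inter target IMPORTANT_DOMAIN_TOKENS) source).isEmpty then false
      else PySem.Set.issubset target source

-- ===== PRECONDITION & SPEC =====
-- Pre_ excludes exactly the inputs where Python A raises KeyError: a 'canonical_tokens' key missing in either dict.
def Pre_matches_standard_pattern_py (prepared_target : List (String × List String)) (prepared_source : List (String × List String)) : Prop :=
  (List.lookup "canonical_tokens" prepared_target).isSome ∧ (List.lookup "canonical_tokens" prepared_source).isSome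
instance (prepared_target : List (String × List String)) (prepared_source : List (String × List String)) : Decidable (Pre_matches_standard_pattern_py prepared_target prepared_source) := by unfold Pre_matches_standard_pattern_py; infer_instance

def pvWitness_matches_standard_pattern_py : (List (String × List String)) × (List (String × List String)) :=
  ([("canonical_tokens", ["deal", "name"])], [("canonical_tokens", ["deal", "name", "id"])])

def Spec_matches_standard_pattern_py (prepared_target : List (String × List String)) (prepared_source : List (String × List String)) (out : Bool) : Prop := out = matches_standard_pattern_py_alt prepared_target prepared_source
instance (prepared_target : List (String × List String)) (prepared_source : List (String × List String)) (out : Bool) : Decidable (Spec_matches_standard_pattern_py prepared_target prepared_source out) := by unfold Spec_matches_standard_pattern_py; infer_instance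

-- ===== CLAIM (what is proved, stated in full; the proofs are below) =====
def Claim_equal_matches_standard_pattern_py : Prop := ∀ (prepared_target : List (String × List String)) (prepared_source : List (String × List String)), Dom_matches_standard_pattern_py prepared_target prepared_source → Pre_matches_standard_pattern_py prepared_target prepared_source → Spec_matches_standard_pattern_py prepared_target prepared_source (matches_standard_pattern_py prepared_target prepared_source)

-- ===== LEMMAS AND PROOFS =====

-- when k is in both lists, A's inner test (remaining target empty, or remaining sets subset)
-- is exactly "set(target) ⊆ set(source)"
lemma pvInner_eq (tt st : List String) (k : String) (hkt : k ∈ tt) (hks : k ∈ st) :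
    ((tt.filter (fun tok => !(tok == k))).isEmpty
      || PySem.Set.issubset (PySem.Set.ofList (tt.filter (fun tok => !(tok == k))))
                            (PySem.Set.ofList (st.filter (fun tok => !(tok == k)))))
    = PySem.Set.issubset (PySem.Set.ofList tt) (PySem.Set.ofList st) := by
  rcases h : PySem.Set.issubset (PySem.Set.ofList tt) (PySem.Set.ofList st) with _ | _
  · -- RHS false: so LHS must be false
    rw [Bool.eq_false_iff] at h ⊢
    intro habs
    apply h
    rw [PySem.Set.issubset_iff]
    intro x hx
    rw [PySem.Set.mem_ofList] at hx ⊢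
    rcases Bool.or_eq_true_iff.mp habs with he | hsub
    · -- remaining target empty: every token of tt equals k
      have := List.isEmpty_iff.mp he
      by_cases hxk : x = k
      · exact hxk ▸ hks
      · exfalso
        have : x ∈ tt.filter (fun tok => !(tok == k)) := by
          simp [List.mem_filter, hx, hxk]
        simp [List.isEmpty_iff.mp he] at this
    · by_cases hxk : x = k
      · exact hxk ▸ hks
      · have hxr : x ∈ tt.filter (fun tok => !(tok == k)) := by
          simp [List.mem_filter, hx, hxk]
        have := (PySem.Set.issubset_iff _ _).mp hsub x ((PySem.Set.mem_ofList _ _).mpr hxr)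
        rw [PySem.Set.mem_ofList, List.mem_filter] at this
        exact this.1
  · -- RHS true: subset holds, so the filtered subset holds too
    rw [Bool.or_eq_true_iff]
    right
    rw [PySem.Set.issubset_iff]
    intro x hx
    rw [PySem.Set.mem_ofList, List.mem_filter] at hx ⊢
    refine ⟨?_, hx.2⟩
    have := (PySem.Set.issubset_iff _ _).mp h x ((PySem.Set.mem_ofList _ _).mpr hx.1)
    exact (PySem.Set.mem_ofList _ _).mp this

-- A's loop computes: some keyword of ks is in both lists, and set(tt) ⊆ set(st)
lemma pvALoop_eq (tt st : List String) (ks : List String) :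
    pvALoop tt st ks
      = (ks.any (fun k => tt.contains k && st.contains k)
         && PySem.Set.issubset (PySem.Set.ofList tt) (PySem.Set.ofList st)) := by
  induction ks with
  | nil => simp [pvALoop]
  | cons k rest ih =>
    rw [pvALoop]
    by_cases hkt : k ∈ tt
    · by_cases hks : k ∈ st
      · have hrw := pvInner_eq tt st k hkt hks
        simp only [List.contains_eq_mem, hkt, hks, decide_true, Bool.and_self, Bool.not_true,
          Bool.and_false, Bool.true_and, if_false, if_true, List.any_cons]
        rcases hsub : PySem.Set.issubset (PySem.Set.ofList tt) (PySem.Set.ofList st) with _ | _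
        · rw [hsub] at hrw
          rcases Bool.or_eq_false_iff.mp hrw with ⟨h1, h2⟩
          simp [h1, h2, ih, hsub]
        · rw [hsub] at hrw
          by_cases he : (tt.filter (fun tok => !(tok == k))).isEmpty = true
          · simp [he]
          · have hss := (Bool.or_eq_true_iff.mp hrw).resolve_left he
            simp [he, hss]
      · simp [List.contains_eq_mem, hkt, hks, ih]
    · simp [List.contains_eq_mem, hkt, ih]

-- membership in the double intersection ↔ a keyword in both token lists
lemma pvInter_isEmpty (tt st : List String) :
    (PySem.Set.inter (PySem.Set.inter (PySem.Set.ofList tt) IMPORTANT_DOMAIN_TOKENS) (PySem.Set.ofList st)).isEmpty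
      = !(IMPORTANT_DOMAIN_TOKENS.any (fun k => tt.contains k && st.contains k)) := by
  rcases h : IMPORTANT_DOMAIN_TOKENS.any (fun k => tt.contains k && st.contains k) with _ | _
  · simp only [Bool.not_false]
    rw [List.isEmpty_iff, List.eq_nil_iff_forall_not_mem]
    intro x hx
    rw [PySem.Set.mem_inter, PySem.Set.mem_inter, PySem.Set.mem_ofList, PySem.Set.mem_ofList] at hx
    rw [List.any_eq_false] at h
    have := h x hx.1.2
    simp [List.contains_eq_mem, hx.1.1, hx.2] at this
  · simp only [Bool.not_true]
    rw [List.any_eq_true] at h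
    obtain ⟨k, hk, hkb⟩ := h
    simp only [List.contains_eq_mem, Bool.and_eq_true, decide_eq_true_eq] at hkb
    rw [Bool.eq_false_iff]
    intro he
    rw [List.isEmpty_iff, List.eq_nil_iff_forall_not_mem] at he
    exact he k (by
      rw [PySem.Set.mem_inter, PySem.Set.mem_inter, PySem.Set.mem_ofList, PySem.Set.mem_ofList]
      exact ⟨⟨hkb.1, hk⟩, hkb.2⟩)

lemma pvOfList_isEmpty (xs : List String) : (PySem.Set.ofList xs).isEmpty = xs.isEmpty := by
  rcases xs with _ | ⟨x, rest⟩
  · rfl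
  · rw [PySem.Set.ofList_cons]; rfl

-- ===== VERDICT (by name: the statement is the Claim_ definition above) =====
theorem matches_standard_pattern_py_spec : Claim_equal_matches_standard_pattern_py := by
  intro pt ps _ hpre
  obtain ⟨h1, h2⟩ := hpre
  unfold Spec_matches_standard_pattern_py matches_standard_pattern_py matches_standard_pattern_py_alt
  obtain ⟨tt, htt⟩ := Option.isSome_iff_exists.mp h1
  obtain ⟨st, hst⟩ := Option.isSome_iff_exists.mp h2
  rw [htt, hst]
  simp only [pvOfList_isEmpty]
  by_cases he : tt.isEmpty || st.isEmpty
  · simp [he]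
  · simp only [he, if_false]
    rw [pvALoop_eq, pvInter_isEmpty]
    rcases h : IMPORTANT_DOMAIN_TOKENS.any (fun k => tt.contains k && st.contains k) with _ | _ <;> simp
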